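-- pv_equiv track=rewrite | github.com/alibusinessali07/Tiktok | weekly_sheet_reader.py | get_unique_requested_by
-- ===== SOURCE A (Python) =====
-- from typing import Any, Dict, List, Optional, Set, Tuple
--
-- def get_unique_requested_by(data: List[Dict[str, Any]]) -> List[str]:
--     """From payment data, return unique 'Requested by' values (after PAID filter not applied here)."""
--     seen = set()
--     out = []
--     for row in data:
--         v = (row.get("Requested by") or "").strip()
--         if v and v not in seen:
--             seen.add(v)
--             out.append(v)
--     return sorted(out)
-- ===== SOURCE B (Python) =====
-- def get_unique_requested_by(data):
--     """From payment data, return unique 'Requested by' values (after PAID filter not applied here)."""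
--     vals = []
--     for row in data:
--         v = (row.get("Requested by") or "").strip()
--         if v:
--             vals.append(v)
--     vals.sort()
--     out = []
--     for v in vals:
--         if not out or out[-1] != v:
--             out.append(v)
--     return out
-- ===== Notes on version B (the rewrite author's own statement) =====
-- stated objective: alternative
-- what changed: B keeps no seen-set: it collects every non-empty stripped value, sorts the list, and then deduplicates in one pass by skipping elements equal to the last one emitted.
import Mathlib
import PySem

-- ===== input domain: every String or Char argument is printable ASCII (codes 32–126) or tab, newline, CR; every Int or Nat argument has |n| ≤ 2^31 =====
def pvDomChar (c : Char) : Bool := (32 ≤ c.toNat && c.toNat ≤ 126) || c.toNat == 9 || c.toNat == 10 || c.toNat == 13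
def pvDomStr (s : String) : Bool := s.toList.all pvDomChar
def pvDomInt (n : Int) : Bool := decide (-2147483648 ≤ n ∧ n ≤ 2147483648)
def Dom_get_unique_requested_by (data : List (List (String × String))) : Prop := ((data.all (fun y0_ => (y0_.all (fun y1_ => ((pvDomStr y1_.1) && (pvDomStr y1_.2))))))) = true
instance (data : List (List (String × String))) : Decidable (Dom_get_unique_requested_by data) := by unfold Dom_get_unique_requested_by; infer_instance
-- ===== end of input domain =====

-- B differs from A by deduplicating without a set: sort all non-empty stripped values, then skip adjacent equals (objective: alternative).

-- shared helper: v = (row.get("Requested by") or "").strip()  (getD "" is exact: None→"" and "" or "" = "")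
def pvVal (row : List (String × String)) : String :=
  PySem.Str.strip ((PySem.Dict.ofList row).getD "Requested by" "")

-- ===== PORT A =====
def get_unique_requested_by (data : List (List (String × String))) : List String :=
  let r := data.foldl (fun (st : PySem.Set String × List String) row =>
      let v := pvVal row
      if v ≠ "" ∧ PySem.Set.contains st.1 v = false then (PySem.Set.add st.1 v, st.2 ++ [v]) else st)
    (PySem.Set.empty, [])
  PySem.List.sorted r.2 (fun x => x) false

-- ===== PORT B =====
def get_unique_requested_by_alt (data : List (List (String × String))) : List String :=
  let vals := data.foldl (fun (vals : List String) row =>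
      let v := pvVal row
      if v ≠ "" then vals ++ [v] else vals) []
  let svals := PySem.List.sorted vals (fun x => x) false
  svals.foldl (fun (out : List String) v =>
      if out = [] ∨ out.getLast? ≠ some v then out ++ [v] else out) []

-- ===== PRECONDITION & SPEC =====
def Spec_get_unique_requested_by (data : List (List (String × String))) (out : List String) : Prop := out = get_unique_requested_by_alt data
instance (data : List (List (String × String))) (out : List String) : Decidable (Spec_get_unique_requested_by data out) := by unfold Spec_get_unique_requested_by; infer_instance

-- ===== CLAIM (what is proved, stated in full; the proofs are below) =====
def Claim_equal_get_unique_requested_by : Prop := ∀ (data : List (List (String × String))), Dom_get_unique_requested_by data → Spec_get_unique_requested_by data (get_unique_requested_by data)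

-- ===== LEMMAS AND PROOFS =====

-- the list of non-empty stripped values, in row order
def pvV (data : List (List (String × String))) : List String :=
  (data.map pvVal).filter (fun v => v ≠ "")

-- adjacent-dedup after a first element `prev`
def pvDD (prev : String) : List String → List String
  | [] => []
  | b :: t => if b = prev then pvDD prev t else b :: pvDD b t

lemma pv_vals_fold (l : List (List (String × String))) (acc : List String) :
    l.foldl (fun (vals : List String) row =>
      let v := pvVal row
      if v ≠ "" then vals ++ [v] else vals) acc = acc ++ pvV l := by
  induction l generalizing acc with
  | nil => simp [pvV]
  | cons r t ih =>
      by_cases h : pvVal r = "" <;> simp [pvV, h, ih, List.filter_cons] at * <;> simp [ih, pvV]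

lemma pv_A_fold (l : List (List (String × String))) (s : PySem.Set String) :
    l.foldl (fun (st : PySem.Set String × List String) row =>
      let v := pvVal row
      if v ≠ "" ∧ PySem.Set.contains st.1 v = false then (PySem.Set.add st.1 v, st.2 ++ [v]) else st)
      (s, s) = ((pvV l).foldl PySem.Set.add s, (pvV l).foldl PySem.Set.add s) := by
  induction l generalizing s with
  | nil => simp [pvV]
  | cons r t ih =>
      rw [List.foldl_cons]
      show List.foldl _
        (if pvVal r ≠ "" ∧ PySem.Set.contains s (pvVal r) = false
          then (PySem.Set.add s (pvVal r), s ++ [pvVal r]) else (s, s)) t = _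
      by_cases h : pvVal r = ""
      · rw [if_neg (by simp [h])]
        rw [ih s]
        simp [pvV, h]
      · by_cases hc : PySem.Set.contains s (pvVal r) = false
        · have hmem : pvVal r ∉ s := by
            intro hx
            rw [(PySem.Set.contains_iff s (pvVal r)).mpr hx] at hc
            exact Bool.noConfusion hc
          have hadd : PySem.Set.add s (pvVal r) = s ++ [pvVal r] := by
            simp [PySem.Set.add, hmem]
          rw [if_pos ⟨h, hc⟩, hadd.symm, ih (PySem.Set.add s (pvVal r))]
          simp [pvV, h]
        · have hmem : pvVal r ∈ s := by
            have : PySem.Set.contains s (pvVal r) = true := by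
              cases hx : PySem.Set.contains s (pvVal r) <;> simp_all
            exact (PySem.Set.contains_iff s (pvVal r)).mp this
          have hadd : PySem.Set.add s (pvVal r) = s := by
            simp [PySem.Set.add, hmem]
          rw [if_neg (fun hx => hc hx.2), ih s]
          simp [pvV, h, hadd]

lemma pv_dd_fold (l : List String) (acc : List String) (a : String) (h : acc.getLast? = some a) :
    l.foldl (fun (out : List String) v =>
      if out = [] ∨ out.getLast? ≠ some v then out ++ [v] else out) acc = acc ++ pvDD a l := by
  induction l generalizing acc a with
  | nil => simp [pvDD]
  | cons b t ih =>
      have hne : acc ≠ [] := by intro hnil; simp [hnil] at h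
      by_cases hb : b = a
      · subst hb
        have hstep : (if acc = [] ∨ acc.getLast? ≠ some b then acc ++ [b] else acc) = acc := by
          simp [h, hne]
        rw [List.foldl_cons, hstep, ih acc b h]
        simp [pvDD]
      · have hlast : acc.getLast? ≠ some b := by
          rw [h]; intro hx; exact hb (Option.some.inj hx).symm
        have hstep : (if acc = [] ∨ acc.getLast? ≠ some b then acc ++ [b] else acc) = acc ++ [b] := by
          rw [if_pos (Or.inr hlast)]
        rw [List.foldl_cons, hstep, ih (acc ++ [b]) b (by simp)]
        simp [pvDD, hb]

lemma pv_mem_dd (a : String) (l : List String) (x : String) :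
    x ∈ a :: pvDD a l ↔ x ∈ a :: l := by
  induction l generalizing a with
  | nil => simp [pvDD]
  | cons b t ih =>
      by_cases hb : b = a
      · subst hb
        rw [show pvDD b (b :: t) = pvDD b t from if_pos rfl, ih b]
        simp [List.mem_cons]
      · rw [show pvDD a (b :: t) = b :: pvDD b t from if_neg hb]
        constructor
        · intro hx
          rcases List.mem_cons.mp hx with h1 | h1
          · simp [h1]
          · have := (ih b).mp h1
            simp [List.mem_cons] at this ⊢
            tauto
        · intro hx
          simp [List.mem_cons] at hx
          rcases hx with h1 | h1 | h1
          · simp [h1]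
          · exact List.mem_cons.mpr (Or.inr ((ih b).mpr (by simp [h1])))
          · exact List.mem_cons.mpr (Or.inr ((ih b).mpr (by simp [h1])))

lemma pv_dd_pairwise (a : String) (l : List String)
    (h : (a :: l).Pairwise (· ≤ ·)) : (a :: pvDD a l).Pairwise (· < ·) := by
  induction l generalizing a with
  | nil => simp [pvDD]
  | cons b t ih =>
      rcases List.pairwise_cons.mp h with ⟨hle, hbt⟩
      by_cases hb : b = a
      · subst hb
        rw [show pvDD b (b :: t) = pvDD b t from if_pos rfl]
        exact ih b (by exact List.pairwise_cons.mpr ⟨fun y hy => (List.pairwise_cons.mp hbt).1 y hy, (List.pairwise_cons.mp hbt).2⟩)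
      · rw [show pvDD a (b :: t) = b :: pvDD b t from if_neg hb]
        have hab : a < b := lt_of_le_of_ne (hle b (by simp)) (Ne.symm hb)
        have hrest : (b :: pvDD b t).Pairwise (· < ·) := ih b hbt
        refine List.pairwise_cons.mpr ⟨?_, hrest⟩
        intro y hy
        rcases List.mem_cons.mp ((pv_mem_dd b t y).mp hy) with h1 | h1
        · exact h1 ▸ hab
        · exact lt_of_lt_of_le hab ((List.pairwise_cons.mp hbt).1 y h1)

-- the core identity: adjacent-dedup of sorted(vals) = sorted(set(vals))
lemma pv_dd_sorted_eq (vals : List String) :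
    (PySem.List.sorted vals (fun x => x) false).foldl (fun (out : List String) v =>
      if out = [] ∨ out.getLast? ≠ some v then out ++ [v] else out) []
    = PySem.List.sorted (PySem.Set.ofList vals) (fun x => x) false := by
  cases hL : PySem.List.sorted vals (fun x => x) false with
  | nil =>
      have hv : vals = [] := (PySem.List.sorted_eq_nil_iff vals (fun x => x) false).mp hL
      subst hv
      rfl
  | cons a t =>
      have hstep : (a :: t).foldl (fun (out : List String) v =>
          if out = [] ∨ out.getLast? ≠ some v then out ++ [v] else out) []
          = a :: pvDD a t := by
        simp only [List.foldl_cons]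
        simpa using pv_dd_fold t [a] a (by simp)
      rw [hstep]
      -- both sides are strictly increasing with the same members
      have hpw : (a :: t).Pairwise (· ≤ ·) := by
        have := PySem.List.sorted_pairwise vals (fun x => x)
        rw [hL] at this; exact this
      have hlt : (a :: pvDD a t).Pairwise (· < ·) := pv_dd_pairwise a t hpw
      have hlt' : (PySem.List.sorted (PySem.Set.ofList vals) (fun x => x) false).Pairwise (· < ·) :=
        PySem.List.sorted_ofList_pairwise_lt vals
      have hmem : ∀ x, x ∈ a :: pvDD a t ↔ x ∈ PySem.List.sorted (PySem.Set.ofList vals) (fun x => x) false := by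
        intro x
        rw [pv_mem_dd, PySem.List.mem_sorted, ← hL, PySem.List.mem_sorted, PySem.Set.mem_ofList]
      have hnd1 : (a :: pvDD a t).Nodup := hlt.imp (fun h => ne_of_lt h)
      have hnd2 : (PySem.List.sorted (PySem.Set.ofList vals) (fun x => x) false).Nodup :=
        hlt'.imp (fun h => ne_of_lt h)
      have hperm : (a :: pvDD a t).Perm (PySem.List.sorted (PySem.Set.ofList vals) (fun x => x) false) :=
        (List.perm_ext_iff_of_nodup hnd1 hnd2).mpr hmem
      exact hperm.eq_of_pairwise (fun a b _ _ h h' => (lt_asymm h h').elim) hlt hlt'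

-- ===== VERDICT (by name: the statement is the Claim_ definition above) =====
theorem get_unique_requested_by_spec : Claim_equal_get_unique_requested_by := by
  intro data _
  unfold Spec_get_unique_requested_by get_unique_requested_by get_unique_requested_by_alt
  rw [pv_vals_fold data []]
  rw [show (PySem.Set.empty : PySem.Set String) = ([] : List String) from rfl] at *
  rw [pv_A_fold data []]
  simp only [List.nil_append]
  rw [pv_dd_sorted_eq (pvV data)]
  congr 1
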